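-- pv_equiv track=rewrite | github.com/tninja/scratch | leetcode/p526_beautiful_arrangement.py | deriveArrangeCandidate
-- ===== SOURCE A (Python) =====
-- def deriveArrangeCandidate(N):
--     candidate = {}
--     for i in range(1, N+1):
--         candidate[i] = list()
--         for j in range(1, N+1):
--             if 0 == i % j or 0 == j % i:
--                 candidate[i].append(j)
--     return candidate
-- ===== SOURCE B (Python) =====
-- def deriveArrangeCandidate(N):
--     # Sieve: for each d, mark d as a divisor of every multiple m <= N.
--     divs = {}
--     for d in range(1, N + 1):
--         for m in range(d, N + 1, d):
--             divs.setdefault(m, []).append(d)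
--     # candidate[i] = divisors of i (ascending, end with i) + proper multiples of i up to N.
--     return {i: divs.get(i, []) + list(range(2 * i, N + 1, i)) for i in range(1, N + 1)}
-- ===== Notes on version B (the rewrite author's own statement) =====
-- stated objective: faster
-- what changed: Replaced the O(N^2) double full-range scan with a divisor sieve (each d is appended to the lists of its multiples) plus stride enumeration of proper multiples, giving O(N log N) total work.
import Mathlib
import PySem

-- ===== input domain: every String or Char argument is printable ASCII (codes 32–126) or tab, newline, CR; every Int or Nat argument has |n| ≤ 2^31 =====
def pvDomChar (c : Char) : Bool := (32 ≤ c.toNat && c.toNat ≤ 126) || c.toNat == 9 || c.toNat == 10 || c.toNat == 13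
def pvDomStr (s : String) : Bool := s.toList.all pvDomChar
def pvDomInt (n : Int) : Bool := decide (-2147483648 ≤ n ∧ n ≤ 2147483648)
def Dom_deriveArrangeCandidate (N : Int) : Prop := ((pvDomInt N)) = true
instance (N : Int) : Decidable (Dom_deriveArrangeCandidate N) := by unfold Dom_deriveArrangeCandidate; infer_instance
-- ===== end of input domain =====

-- B replaces A's O(N^2) double full-range scan by a divisor sieve plus stride enumeration of multiples (faster; return value proved equal).

-- ===== PORT A =====
def deriveArrangeCandidate (N : Int) : List (Int × List Int) :=
  ((PySem.List.pyRange 1 (N+1) 1).foldl (fun cand i =>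
      (PySem.List.pyRange 1 (N+1) 1).foldl (fun cand j =>
          if 0 == PySem.Int.mod i j || 0 == PySem.Int.mod j i then
            cand.modify i [] (fun v => v ++ [j])       -- candidate[i].append(j)
          else cand)
        (cand.insert i ([] : List Int)))               -- candidate[i] = list()
    PySem.Dict.empty).items

-- ===== PORT B =====
-- divs.setdefault(m, []).append(d)  =  Dict.modify m [] (· ++ [d]);
-- the final dict comprehension (distinct keys, in order) is built directly as its items list.
def deriveArrangeCandidate_alt (N : Int) : List (Int × List Int) :=
  let divs : PySem.Dict Int (List Int) :=
    (PySem.List.pyRange 1 (N+1) 1).foldl (fun dv d =>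
        (PySem.List.pyRange d (N+1) d).foldl (fun dv m => dv.modify m [] (fun v => v ++ [d])) dv)
      PySem.Dict.empty
  (PySem.List.pyRange 1 (N+1) 1).map (fun i =>
    (i, divs.getD i [] ++ PySem.List.pyRange (2*i) (N+1) i))

-- ===== PRECONDITION & SPEC =====
def Spec_deriveArrangeCandidate (N : Int) (out : List (Int × List Int)) : Prop := out = deriveArrangeCandidate_alt N
instance (N : Int) (out : List (Int × List Int)) : Decidable (Spec_deriveArrangeCandidate N out) := by unfold Spec_deriveArrangeCandidate; infer_instance

-- ===== CLAIM (what is proved, stated in full; the proofs are below) =====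
def Claim_equal_deriveArrangeCandidate : Prop := ∀ (N : Int), Dom_deriveArrangeCandidate N → Spec_deriveArrangeCandidate N (deriveArrangeCandidate N)

-- ===== LEMMAS AND PROOFS =====

-- a Nodup list filtered for equality with c is [c] or []
theorem pv_filter_beq_nodup (l : List Int) (c : Int) (hl : l.Nodup) :
    l.filter (fun x => x == c) = if c ∈ l then [c] else [] := by
  induction l with
  | nil => simp
  | cons a t ih =>
    rcases List.nodup_cons.mp hl with ⟨ha, ht⟩
    by_cases hac : a = c
    · subst hac
      have : t.filter (fun x => x == a) = [] := by rw [ih ht]; simp [ha]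
      simp [this]
    · simp [hac, ih ht, List.mem_cons, Ne.symm hac]

-- positive-step pyRange is strictly increasing
theorem pv_pyRange_pairwise (a b s : Int) (hs : 0 < s) :
    (PySem.List.pyRange a b s).Pairwise (· < ·) := by
  rw [PySem.List.pyRange_of_pos a b hs, List.pairwise_map]
  refine List.pairwise_lt_range.imp_of_mem ?_
  intro k k' _ _ (h : k < k')
  have hk : (k : Int) < (k' : Int) := by exact_mod_cast h
  nlinarith

theorem pv_pyRange_nodup (a b s : Int) (hs : 0 < s) :
    (PySem.List.pyRange a b s).Nodup :=
  (pv_pyRange_pairwise a b s hs).nodup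

-- a fold of appends into the value at a FIXED key i
theorem pv_modify_fold_getD (l : List Int) (i : Int) (dv : PySem.Dict Int (List Int)) (c : Int) :
    (l.foldl (fun d j => d.modify i [] (fun v => v ++ [j])) dv).getD c [] =
      dv.getD c [] ++ if i = c then l else [] := by
  have h : (l.foldl (fun d j => d.modify i [] (fun v => v ++ [j])) dv)
      = ((l.map (fun j => ((i, j) : Int × Int))).foldl
          (fun d p => d.modify p.1 [] (fun v => v ++ [p.2])) dv) := by
    rw [List.foldl_map]
  rw [h, PySem.Dict.getD_foldl_modify_append, List.filter_map]
  by_cases hic : i = c <;> simp [hic, Function.comp, List.map_map]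

-- a fold appending a FIXED value x at varying keys from a Nodup list
theorem pv_modify_fold_getD' (l : List Int) (x : Int) (dv : PySem.Dict Int (List Int)) (c : Int)
    (hl : l.Nodup) :
    (l.foldl (fun d m => d.modify m [] (fun v => v ++ [x])) dv).getD c [] =
      dv.getD c [] ++ if c ∈ l then [x] else [] := by
  have h : (l.foldl (fun d m => d.modify m [] (fun v => v ++ [x])) dv)
      = ((l.map (fun m => ((m, x) : Int × Int))).foldl
          (fun d p => d.modify p.1 [] (fun v => v ++ [p.2])) dv) := by
    rw [List.foldl_map]
  rw [h, PySem.Dict.getD_foldl_modify_append, List.filter_map]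
  have hc1 : (fun (p : Int × Int) => p.1 == c) ∘ (fun m => ((m, x) : Int × Int)) = fun m => m == c := rfl
  rw [hc1, pv_filter_beq_nodup l c hl]
  by_cases hc : c ∈ l <;> simp [hc]

-- the key set of a fixed-key append fold
theorem pv_modify_fold_keys (l : List Int) (i : Int) (dv : PySem.Dict Int (List Int))
    (h : dv.contains i = true) :
    (l.foldl (fun d j => d.modify i [] (fun v => v ++ [j])) dv).keys = dv.keys := by
  induction l generalizing dv with
  | nil => rfl
  | cons a t ih =>
    simp only [List.foldl_cons]
    rw [ih]
    · rw [PySem.Dict.keys_modify, PySem.Dict.keys_insert_of_contains _ _ h]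
    · rw [PySem.Dict.contains_modify]; simp [h]

-- B's sieve: value at c collects exactly the d whose multiple list contains c
theorem pv_sieve_getD (N : Int) (L : List Int) (hL : ∀ d ∈ L, 0 < d)
    (dv : PySem.Dict Int (List Int)) (c : Int) :
    (L.foldl (fun dv d =>
        (PySem.List.pyRange d (N+1) d).foldl (fun dv m => dv.modify m [] (fun v => v ++ [d])) dv)
      dv).getD c [] =
    dv.getD c [] ++ L.filter (fun d => decide (c ∈ PySem.List.pyRange d (N+1) d)) := by
  induction L generalizing dv with
  | nil => simp
  | cons d t ih =>
    simp only [List.foldl_cons]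
    rw [ih (fun x hx => hL x (List.mem_cons_of_mem _ hx)),
        pv_modify_fold_getD' _ _ _ _ (pv_pyRange_nodup _ _ _ (hL d (List.mem_cons_self)))]
    by_cases hc : c ∈ PySem.List.pyRange d (N+1) d <;> simp [hc]

-- A's outer fold: keys are 1..b-1 and each value is the full filtered scan
theorem pv_A_fold (N : Int) (b : Int) (hb : 1 ≤ b) :
    ((PySem.List.pyRange 1 b 1).foldl (fun cand i =>
        (PySem.List.pyRange 1 (N+1) 1).foldl (fun cand j =>
            if 0 == PySem.Int.mod i j || 0 == PySem.Int.mod j i then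
              cand.modify i [] (fun v => v ++ [j])
            else cand)
          (cand.insert i ([] : List Int)))
      PySem.Dict.empty).keys = PySem.List.pyRange 1 b 1 ∧
    ∀ k : Int, ((PySem.List.pyRange 1 b 1).foldl (fun cand i =>
        (PySem.List.pyRange 1 (N+1) 1).foldl (fun cand j =>
            if 0 == PySem.Int.mod i j || 0 == PySem.Int.mod j i then
              cand.modify i [] (fun v => v ++ [j])
            else cand)
          (cand.insert i ([] : List Int)))
      PySem.Dict.empty).getD k [] =
      if 1 ≤ k ∧ k < b then
        (PySem.List.pyRange 1 (N+1) 1).filter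
          (fun j => 0 == PySem.Int.mod k j || 0 == PySem.Int.mod j k)
      else [] := by
  induction b, hb using Int.le_induction with
  | base =>
    rw [PySem.List.pyRange_one_eq_nil le_rfl]
    constructor
    · rfl
    · intro k
      have : ¬ (1 ≤ k ∧ k < 1) := by omega
      simp [this, PySem.Dict.getD_empty]
  | succ b hb ih =>
    obtain ⟨ihk, ihg⟩ := ih
    rw [PySem.List.pyRange_one_succ_right hb, List.foldl_append]
    set F := ((PySem.List.pyRange 1 b 1).foldl (fun cand i =>
        (PySem.List.pyRange 1 (N+1) 1).foldl (fun cand j =>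
            if 0 == PySem.Int.mod i j || 0 == PySem.Int.mod j i then
              cand.modify i [] (fun v => v ++ [j])
            else cand)
          (cand.insert i ([] : List Int)))
      PySem.Dict.empty) with hF
    simp only [List.foldl_cons, List.foldl_nil]
    -- turn the inner if-fold into a fold over a filtered list
    rw [PySem.List.foldl_if_eq_foldl_filter
          (p := fun j => 0 == PySem.Int.mod b j || 0 == PySem.Int.mod j b)
          (f := fun (d : PySem.Dict Int (List Int)) j => d.modify b [] (fun v => v ++ [j]))]
    have hbmem : b ∉ (PySem.List.pyRange 1 b 1) := by
      rw [PySem.List.mem_pyRange_one]; omega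
    have hbc : F.contains b = false := by
      by_contra hc
      have := (PySem.Dict.contains_iff_mem_keys F b).mp (by
        cases h : F.contains b
        · exact absurd h hc
        · rfl)
      rw [ihk] at this; exact hbmem this
    have hins : (F.insert b ([] : List Int)).contains b = true := by
      exact PySem.Dict.contains_insert_self _ _ _
    constructor
    · rw [pv_modify_fold_keys _ _ _ hins,
          PySem.Dict.keys_insert_of_not_contains _ _ hbc, ihk]
    · intro k
      rw [pv_modify_fold_getD, PySem.Dict.getD_insert]
      by_cases hkb : k = b
      · subst hkb
        have h1 : (1:Int) ≤ k ∧ k < k + 1 := ⟨hb, by omega⟩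
        simp [h1]
      · have h2 : ¬ (b = k) := fun h => hkb h.symm
        simp only [if_neg hkb, if_neg h2, List.append_nil, ihg k]
        have : (1 ≤ k ∧ k < b) ↔ (1 ≤ k ∧ k < b + 1) := by omega
        by_cases h3 : 1 ≤ k ∧ k < b
        · rw [if_pos h3, if_pos (this.mp h3)]
        · rw [if_neg h3, if_neg (fun h => h3 (this.mpr h))]

-- beyond i the scan keeps exactly the multiples of i, which form the stride range
theorem pv_filter_multiples (N i : Int) (hi : 1 ≤ i) :
    (PySem.List.pyRange (i+1) (N+1) 1).filter
        (fun j => 0 == PySem.Int.mod i j || 0 == PySem.Int.mod j i) =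
      PySem.List.pyRange (2*i) (N+1) i := by
  have step1 : (PySem.List.pyRange (i+1) (N+1) 1).filter
        (fun j => 0 == PySem.Int.mod i j || 0 == PySem.Int.mod j i) =
      (PySem.List.pyRange (i+1) (N+1) 1).filter (fun j => 0 == PySem.Int.mod j i) := by
    apply List.filter_congr
    intro j hj
    rw [PySem.List.mem_pyRange_one] at hj
    have hmod : PySem.Int.mod i j = i := by
      rw [PySem.Int.mod_eq_emod_of_pos (show (0:Int) < j by omega)]
      exact Int.emod_eq_of_lt (by omega) (by omega)
    rw [hmod]
    have : (0 == i) = false := by simp; omega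
    rw [this, Bool.false_or]
  rw [step1]
  apply List.Perm.eq_of_pairwise (le := (· < ·))
  · intro a b _ _ h1 h2; omega
  · exact (pv_pyRange_pairwise _ _ _ one_pos).filter _
  · exact pv_pyRange_pairwise _ _ _ (by omega)
  · rw [List.perm_ext_iff_of_nodup
      (((pv_pyRange_pairwise _ _ _ one_pos).filter _).nodup)
      ((pv_pyRange_pairwise _ _ _ (show (0:Int) < i by omega)).nodup)]
    intro j
    rw [List.mem_filter, PySem.List.mem_pyRange_one,
        PySem.List.mem_pyRange_iff_of_pos (show (0:Int) < i by omega)]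
    constructor
    · rintro ⟨⟨hj1, hj2⟩, hd⟩
      have hd : i ∣ j := by
        have := (PySem.Int.mod_eq_zero_iff_dvd j i).mp (by
          have : (0 == PySem.Int.mod j i) = true := hd
          simp at this; omega)
        exact this
      obtain ⟨m, hm⟩ := hd
      have hm2 : 1 < m := by nlinarith
      exact ⟨by nlinarith, by omega, ⟨m - 2, by subst hm; ring⟩⟩
    · rintro ⟨h1, h2, hd⟩
      have hdj : i ∣ j := by
        have h2i : i ∣ 2 * i := ⟨2, mul_comm 2 i⟩
        have := dvd_add hd h2i
        simpa using this
      refine ⟨⟨by omega, h2⟩, ?_⟩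
      have : PySem.Int.mod j i = 0 := (PySem.Int.mod_eq_zero_iff_dvd j i).mpr hdj
      simp [this]


-- the sieve's value at i is the scan of 1..i
theorem pv_filter_divisors (N i : Int) (h1 : 1 ≤ i) (h2 : i ≤ N) :
    (PySem.List.pyRange 1 (N+1) 1).filter
        (fun d => decide (i ∈ PySem.List.pyRange d (N+1) d)) =
      (PySem.List.pyRange 1 (i+1) 1).filter
        (fun j => 0 == PySem.Int.mod i j || 0 == PySem.Int.mod j i) := by
  rw [PySem.List.pyRange_one_append 1 (i+1) (N+1) (by omega) (by omega), List.filter_append]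
  have hupper : (PySem.List.pyRange (i+1) (N+1) 1).filter
      (fun d => decide (i ∈ PySem.List.pyRange d (N+1) d)) = [] := by
    rw [List.filter_eq_nil_iff]
    intro d hd
    rw [PySem.List.mem_pyRange_one] at hd
    simp only [decide_eq_true_eq]
    rw [PySem.List.mem_pyRange_iff_of_pos (show (0:Int) < d by omega)]
    push Not
    intro h; omega
  rw [hupper, List.append_nil]
  apply List.filter_congr
  intro d hd
  rw [PySem.List.mem_pyRange_one] at hd
  have hmem : (i ∈ PySem.List.pyRange d (N+1) d) ↔ (d ≤ i ∧ i < N+1 ∧ d ∣ i - d) :=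
    PySem.List.mem_pyRange_iff_of_pos (show (0:Int) < d by omega) i
  simp only [hmem]
  by_cases hdvd : d ∣ i
  · have hL : (decide (d ≤ i ∧ i < N + 1 ∧ d ∣ i - d)) = true := by
      simp only [decide_eq_true_eq]
      exact ⟨by omega, by omega, (dvd_sub_right hdvd).mpr dvd_rfl⟩
    rw [hL]
    have : PySem.Int.mod i d = 0 := (PySem.Int.mod_eq_zero_iff_dvd i d).mpr hdvd
    simp [this]
  · have hL : (decide (d ≤ i ∧ i < N + 1 ∧ d ∣ i - d)) = false := by
      simp only [decide_eq_false_iff_not]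
      rintro ⟨_, _, hsub⟩
      exact hdvd (by have := dvd_add hsub dvd_rfl; simpa using this)
    rw [hL]
    have hm1 : PySem.Int.mod i d ≠ 0 := fun h => hdvd ((PySem.Int.mod_eq_zero_iff_dvd i d).mp h)
    have hm2 : PySem.Int.mod d i ≠ 0 := by
      intro h
      have hid : i ∣ d := (PySem.Int.mod_eq_zero_iff_dvd d i).mp h
      have : i ≤ d := Int.le_of_dvd (by omega) hid
      have : d = i := by omega
      exact hdvd (this ▸ dvd_rfl)
    simp [Ne.symm hm1, Ne.symm hm2]


-- ===== VERDICT (by name: the statement is the Claim_ definition above) =====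
theorem deriveArrangeCandidate_spec : Claim_equal_deriveArrangeCandidate := by
  intro N _
  unfold Spec_deriveArrangeCandidate deriveArrangeCandidate deriveArrangeCandidate_alt
  by_cases hN : 0 ≤ N
  · obtain ⟨hkeys, hgetD⟩ := pv_A_fold N (N+1) (by omega)
    rw [PySem.Dict.items_eq_map_keys _
          (by rw [hkeys]; exact PySem.List.nodup_pyRange_one 1 (N+1)) ([] : List Int), hkeys]
    apply List.map_congr_left
    intro i hi
    rw [PySem.List.mem_pyRange_one] at hi
    rw [hgetD i, if_pos ⟨hi.1, by omega⟩]
    rw [pv_sieve_getD N _ (fun d hd => by rw [PySem.List.mem_pyRange_one] at hd; omega) _ i,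
        PySem.Dict.getD_empty, List.nil_append]
    rw [pv_filter_divisors N i hi.1 (by omega),
        PySem.List.pyRange_one_append 1 (i+1) (N+1) (by omega) (by omega), List.filter_append,
        pv_filter_multiples N i hi.1]
  · have hnil : PySem.List.pyRange 1 (N+1) 1 = [] := PySem.List.pyRange_one_eq_nil (by omega)
    rw [hnil]
    rfl
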